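-- pv_equiv track=rewrite | github.com/bernarducs/therollingbot | dao/dao_lyrics.py | transform_verses
-- ===== SOURCE A (Python) =====
-- def transform_verses(verses):
--     """
--     take a song's text and put into list with verses
--     :param verses:
--     :return:
--     """
--     parsed = list()
--
--     def func(v):
--         return ['\n'.join(v[i:i + 2]) for i in range(0, len(v), 2)]
--
--     for verse in verses:
--         n_items = len(verse)
--         if n_items % 2 == 0:
--             parsed.extend(func(verse))
--         else:
--             first, last = verse[:-3], verse[-3:]
--             parsed.extend(func(first))
--             parsed.extend(['\n'.join(last)])
--
--     parsed_clean = list(filter(None, parsed))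
--     return parsed_clean
-- ===== SOURCE B (Python) =====
-- def transform_verses(verses):
--     """
--     take a song's text and put into list with verses
--     :param verses:
--     :return:
--     """
--     chunks = []
--     for verse in verses:
--         rest = verse
--         while rest:
--             if len(rest) == 3:
--                 chunks.append('\n'.join(rest))
--                 rest = []
--             else:
--                 chunks.append('\n'.join(rest[:2]))
--                 rest = rest[2:]
--     return list(filter(None, chunks))
-- ===== Notes on version B (the rewrite author's own statement) =====
-- stated objective: simpler
-- what changed: B replaces A's per-verse parity branch with the verse[:-3]/verse[-3:] split and the range-step-2 comprehension by one uniform consuming loop that emits the remaining 3 lines as one chunk or else the next 2 lines, so the parity case analysis disappears.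
import Mathlib
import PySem

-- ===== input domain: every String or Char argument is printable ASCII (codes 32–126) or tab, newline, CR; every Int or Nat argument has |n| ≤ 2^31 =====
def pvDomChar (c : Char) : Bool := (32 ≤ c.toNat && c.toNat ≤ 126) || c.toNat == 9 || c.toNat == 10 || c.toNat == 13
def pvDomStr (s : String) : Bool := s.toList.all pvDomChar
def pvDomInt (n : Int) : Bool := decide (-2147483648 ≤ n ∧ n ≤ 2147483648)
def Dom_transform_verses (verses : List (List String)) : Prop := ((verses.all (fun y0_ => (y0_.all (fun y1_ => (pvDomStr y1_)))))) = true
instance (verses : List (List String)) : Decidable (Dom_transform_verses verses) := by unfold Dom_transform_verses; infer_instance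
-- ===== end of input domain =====

-- B replaces A's per-verse parity branch with the verse[:-3]/verse[-3:] split and the
-- step-2 range comprehension by one uniform consuming loop (emit the 3 remaining lines
-- as one chunk, or else the next 2): simpler decomposition, same cost.

-- ===== PORT A =====
-- A's inner 'def func(v)': '\n'-joined pairs via a step-2 range comprehension
def tvFunc (v : List String) : List String :=
  (PySem.List.pyRange 0 (v.length : Int) 2).map
    (fun i => PySem.Str.join "\n" (PySem.List.slice v (some i) (some (i + 2))))

def transform_verses (verses : List (List String)) : List String :=
  let parsed := verses.foldl
    (fun parsed verse =>
      if verse.length % 2 = 0 then parsed ++ tvFunc verse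
      else
        let first := PySem.List.slice verse none (some (-3))
        let last := PySem.List.slice verse (some (-3)) none
        (parsed ++ tvFunc first) ++ [PySem.Str.join "\n" last]) []
  parsed.filter (fun s => s != "")   -- list(filter(None, parsed)): keep truthy (non-empty) strings

-- ===== PORT B =====
-- the 'while rest' loop of Source B; rest[:2] / rest[2:] are take 2 / drop 2 (exact: non-negative slice bounds clamp like take/drop)
def tvGo : List String → List String
  | [] => []
  | x :: rest =>
    if (x :: rest).length = 3 then [PySem.Str.join "\n" (x :: rest)]
    else PySem.Str.join "\n" ((x :: rest).take 2) :: tvGo ((x :: rest).drop 2)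
termination_by v => v.length
decreasing_by simp

def transform_verses_alt (verses : List (List String)) : List String :=
  (verses.foldl (fun chunks verse => chunks ++ tvGo verse) []).filter (fun s => s != "")

-- ===== PRECONDITION & SPEC =====
def Spec_transform_verses (verses : List (List String)) (out : List String) : Prop := out = transform_verses_alt verses
instance (verses : List (List String)) (out : List String) : Decidable (Spec_transform_verses verses out) := by unfold Spec_transform_verses; infer_instance

-- ===== CLAIM (what is proved, stated in full; the proofs are below) =====
def Claim_equal_transform_verses : Prop := ∀ (verses : List (List String)), Dom_transform_verses verses → Spec_transform_verses verses (transform_verses verses)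

-- ===== LEMMAS AND PROOFS =====

-- proof-side characterisation of tvFunc: the pair chunks, written structurally
def tvPairs : List String → List String
  | [] => []
  | [x] => [PySem.Str.join "\n" [x]]
  | a :: b :: r => PySem.Str.join "\n" [a, b] :: tvPairs r

lemma tvPairs_form (v : List String) :
    (List.range ((v.length + 1) / 2)).map
      (fun k => PySem.Str.join "\n" ((v.drop (2 * k)).take 2)) = tvPairs v := by
  induction v using tvPairs.induct with
  | case1 => simp [tvPairs]
  | case2 x => simp [tvPairs]
  | case3 a b r ih =>
    have hlen : ((a :: b :: r).length + 1) / 2 = (r.length + 1) / 2 + 1 := by simp; omega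
    rw [hlen, List.range_succ_eq_map, List.map_cons, List.map_map]
    simp only [tvPairs]
    rw [← ih]
    congr 1

lemma tvFunc_eq_pairs (v : List String) : tvFunc v = tvPairs v := by
  rw [← tvPairs_form]
  unfold tvFunc
  rw [PySem.List.pyRange_of_pos _ _ (by norm_num)]
  rw [List.map_map]
  have hm : (if (0:Int) < (v.length:Int) then (((v.length:Int) - 0 + 2 - 1) / 2).toNat else 0)
      = (v.length + 1) / 2 := by
    split_ifs with h <;> omega
  rw [hm]
  apply List.map_congr_left
  intro k hk
  simp only [Function.comp]
  have h1 : (0 : Int) + 2 * (k : Int) = ((2 * k : Nat) : Int) := by push_cast; ring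
  rw [h1, show ((2*k:Nat):Int) + 2 = ((2*k:Nat):Int) + ((2:Nat):Int) by norm_num,
      PySem.List.slice_natCast_add]

-- A's per-verse contribution, slices resolved to take/drop
def tvChunkA (v : List String) : List String :=
  if v.length % 2 = 0 then tvPairs v
  else tvPairs (v.take (v.length - 3)) ++ [PySem.Str.join "\n" (v.drop (v.length - 3))]

lemma tvChunkA_eq_go : ∀ (n : Nat) (v : List String), v.length ≤ n → tvChunkA v = tvGo v := by
  intro n
  induction n with
  | zero =>
    intro v hv
    match v, hv with
    | [], _ => simp [tvChunkA, tvPairs, tvGo]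
  | succ n ih =>
    intro v hv
    match v with
    | [] => simp [tvChunkA, tvPairs, tvGo]
    | [x] => simp [tvChunkA, tvPairs, tvGo]
    | a :: b :: r =>
      by_cases h3 : r.length = 1
      · match r, h3 with
        | [c], _ => simp [tvChunkA, tvPairs, tvGo]
      · rw [tvGo]
        have hne : ¬ (a :: b :: r).length = 3 := by simp; omega
        rw [if_neg hne]
        simp only [List.take_succ_cons, List.take_zero, List.drop_succ_cons, List.drop_zero]
        have hr : r.length ≤ n := by simp at hv; omega
        have ihr := ih r hr
        by_cases hpar : (a :: b :: r).length % 2 = 0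
        · have hrpar : r.length % 2 = 0 := by simp at hpar ⊢; omega
          rw [tvChunkA, if_pos hpar]
          simp only [tvPairs]
          rw [← ihr, tvChunkA, if_pos hrpar]
        · have hrpar : ¬ r.length % 2 = 0 := by simp at hpar ⊢; omega
          have hrlen : 3 ≤ r.length := by omega
          rw [tvChunkA, if_neg hpar]
          have hlen1 : (a :: b :: r).length - 3 = (r.length - 3) + 2 := by simp; omega
          have htake : (a :: b :: r).take ((a :: b :: r).length - 3)
              = a :: b :: r.take (r.length - 3) := by rw [hlen1]; rfl
          have hdrop : (a :: b :: r).drop ((a :: b :: r).length - 3)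
              = r.drop (r.length - 3) := by rw [hlen1]; rfl
          rw [htake, hdrop]
          simp only [tvPairs, List.cons_append]
          rw [← ihr, tvChunkA, if_neg hrpar]

-- A's loop body, with the negative slices resolved, equals 'append tvChunkA'
lemma tvBodyA (acc : List String) (v : List String) :
    (if v.length % 2 = 0 then acc ++ tvFunc v
     else (acc ++ tvFunc (PySem.List.slice v none (some (-3))))
       ++ [PySem.Str.join "\n" (PySem.List.slice v (some (-3)) none)])
    = acc ++ tvChunkA v := by
  rw [PySem.List.slice_to_neg_ofNat v 3 (by norm_num),
      PySem.List.slice_from_neg_ofNat v 3 (by norm_num)]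
  unfold tvChunkA
  split_ifs with h
  · rw [tvFunc_eq_pairs]
  · rw [tvFunc_eq_pairs, List.append_assoc]

-- ===== VERDICT (by name: the statement is the Claim_ definition above) =====
theorem transform_verses_spec : Claim_equal_transform_verses := by
  intro verses _
  unfold Spec_transform_verses transform_verses transform_verses_alt
  have hA : verses.foldl
      (fun parsed verse =>
        if verse.length % 2 = 0 then parsed ++ tvFunc verse
        else
          let first := PySem.List.slice verse none (some (-3))
          let last := PySem.List.slice verse (some (-3)) none
          (parsed ++ tvFunc first) ++ [PySem.Str.join "\n" last]) []
      = verses.flatMap tvChunkA := by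
    rw [show (fun (parsed : List String) (verse : List String) =>
        if verse.length % 2 = 0 then parsed ++ tvFunc verse
        else
          let first := PySem.List.slice verse none (some (-3))
          let last := PySem.List.slice verse (some (-3)) none
          (parsed ++ tvFunc first) ++ [PySem.Str.join "\n" last])
      = (fun parsed verse => parsed ++ tvChunkA verse) from
        funext fun acc => funext fun v => tvBodyA acc v]
    rw [PySem.List.foldl_append_eq_flatMap]
    simp
  have hB : verses.foldl (fun chunks verse => chunks ++ tvGo verse) []
      = verses.flatMap tvGo := by
    rw [PySem.List.foldl_append_eq_flatMap]; simp
  rw [hA, hB, show tvChunkA = tvGo from funext fun v => tvChunkA_eq_go v.length v le_rfl]
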